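-- pv_equiv track=rewrite | github.com/denniswu28/cosmology | scripts/write_fit_tomo.py | assign_type
-- ===== SOURCE A (Python) =====
-- obj_type = 'roman'
--
-- twopt_indices = {'truth': {
--     'xip': 0,
--     'xim': 300,
--     'gammat': 600,
--     'wtheta': 980},
--     'rubin': {
--     'xip': 0,
--     'xim': 300,
--     'gammat': 600,
--     'wtheta': 1080},
--     'roman': {
--     'xip': 0,
--     'xim': 300,
--     'gammat': 600,
--     'wtheta': 1080},
-- }
--
-- def assign_type(index):
--     # Sort the dictionary by value to ensure the indices are in order
--     sorted_types = sorted(twopt_indices[obj_type].items(), key=lambda x: x[1])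
--     for i in range(len(sorted_types)):
--         # Check if the current index is less than the starting index of the next type
--         if i + 1 < len(sorted_types) and index < sorted_types[i + 1][1]:
--             return sorted_types[i][0]
--         # For the last type segment
--         elif i + 1 == len(sorted_types):
--             return sorted_types[i][0]
--     return "Unknown"
-- ===== SOURCE B (Python) =====
-- import bisect
--
-- obj_type = 'roman'
--
-- twopt_indices = {'truth': {
--     'xip': 0,
--     'xim': 300,
--     'gammat': 600,
--     'wtheta': 980},
--     'rubin': {
--     'xip': 0,
--     'xim': 300,
--     'gammat': 600,
--     'wtheta': 1080},
--     'roman': {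
--     'xip': 0,
--     'xim': 300,
--     'gammat': 600,
--     'wtheta': 1080},
-- }
--
-- _names, _bounds = zip(*sorted(twopt_indices[obj_type].items(), key=lambda x: x[1]))
--
-- def assign_type(index):
--     pos = bisect.bisect_right(_bounds, index) - 1
--     return _names[max(0, pos)]
-- ===== Notes on version B (the rewrite author's own statement) =====
-- stated objective: idiomatic
-- what changed: The linear fall-through scan over the sorted (name, start) pairs is replaced by a module-level precomputed table of boundaries and names plus a bisect_right binary search (clamped at 0), removing both the per-call sort and the loop.
import Mathlib
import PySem

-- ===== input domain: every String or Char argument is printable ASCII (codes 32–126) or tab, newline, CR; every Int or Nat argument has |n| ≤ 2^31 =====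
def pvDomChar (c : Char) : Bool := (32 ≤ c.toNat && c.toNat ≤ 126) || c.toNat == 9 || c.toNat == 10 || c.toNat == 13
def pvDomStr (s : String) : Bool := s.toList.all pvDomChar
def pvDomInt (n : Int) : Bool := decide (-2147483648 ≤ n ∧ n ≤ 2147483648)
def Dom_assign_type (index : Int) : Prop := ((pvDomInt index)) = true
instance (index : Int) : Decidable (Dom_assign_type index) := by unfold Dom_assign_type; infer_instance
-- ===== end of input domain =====

-- B replaces A's per-call sort + linear fall-through scan by a precomputed boundary table
-- searched with bisect_right (clamped at 0): idiomatic, no per-call sort or loop.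

-- ===== PORT A =====
-- twopt_indices[obj_type] for obj_type = 'roman'
def twoptRoman : PySem.Dict String Int :=
  (PySem.Dict.empty.insert "xip" 0 |>.insert "xim" 300 |>.insert "gammat" 600 |>.insert "wtheta" 1080)

-- the for-loop over range(len(sorted_types)), step for step (the `and` as nested ifs)
def assignLoopA (index : Int) (sorted_types : List (String × Int)) (i : Nat) : String :=
  if _h : i < sorted_types.length then
    if i + 1 < sorted_types.length then
      if index < (sorted_types.getD (i+1) ("", 0)).2 then
        (sorted_types.getD i ("", 0)).1
      else assignLoopA index sorted_types (i+1)
    else if i + 1 = sorted_types.length then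
      (sorted_types.getD i ("", 0)).1
    else assignLoopA index sorted_types (i+1)
  else "Unknown"
termination_by sorted_types.length - i

def assign_type (index : Int) : String :=
  let sorted_types := PySem.List.sorted (twoptRoman.items) (fun x => x.2)
  assignLoopA index sorted_types 0

-- ===== PORT B =====
def bNames : List String := ["xip", "xim", "gammat", "wtheta"]
def bBounds : List Int := [0, 300, 600, 1080]

-- bisect.bisect_right on a sorted list, ported by hand (exact: counts elements ≤ index)
def bisectRight (xs : List Int) (x : Int) : Nat :=
  match xs with
  | [] => 0
  | y :: ys => if x < y then 0 else 1 + bisectRight ys x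

def assign_type_alt (index : Int) : String :=
  let pos : Int := (bisectRight bBounds index : Int) - 1
  (bNames.getD (max 0 pos).toNat "")

-- ===== PRECONDITION & SPEC =====
def Spec_assign_type (index : Int) (out : String) : Prop := out = assign_type_alt index
instance (index : Int) (out : String) : Decidable (Spec_assign_type index out) := by unfold Spec_assign_type; infer_instance

-- ===== CLAIM (what is proved, stated in full; the proofs are below) =====
def Claim_equal_assign_type : Prop := ∀ (index : Int), Dom_assign_type index → Spec_assign_type index (assign_type index)

-- ===== LEMMAS AND PROOFS =====

-- ===== VERDICT (by name: the statement is the Claim_ definition above) =====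
lemma sortedRoman_eq :
    PySem.List.sorted (twoptRoman.items) (fun x => x.2)
      = [("xip", 0), ("xim", 300), ("gammat", 600), ("wtheta", 1080)] := by
  decide

theorem assign_type_spec : Claim_equal_assign_type := by
  intro index _
  unfold Spec_assign_type assign_type assign_type_alt
  rw [sortedRoman_eq]
  rw [assignLoopA, assignLoopA, assignLoopA, assignLoopA]
  simp [bisectRight, bBounds, bNames]
  split_ifs <;> simp_all <;> omega
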